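-- pv_equiv track=rewrite | github.com/itscomputers/ebe-python | numth/lucas_sequence/modular.py | by_index
-- ===== SOURCE A (Python) =====
-- def by_index(k, P, Q, modulus):
--     """
--     Compute kth terms of Lucas sequence triple modulo given modulus.
--
--     params
--     + k : int
--     + P : int
--     + Q : int
--     + modulus : int
--         P, Q, modulus are Lucas sequence params
--
--     return
--     (U_k, V_k, Q_k) : tuple
--     """
--     if k == 0:
--         return _term_zero(P, Q, modulus)
--     elif k == 1:
--         return _term_one(P, Q, modulus)
--     elif k % 2 == 0:
--         return double_index(*by_index(k // 2, P, Q, modulus), modulus)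
--     else:
--         return index_plus_one(*by_index(k - 1, P, Q, modulus), P, Q, modulus)
--
-- def double_index(U_k, V_k, Q_k, modulus):
--     """
--     Given kth elements of Lucas sequence triple, produces (2k)th elements.
--
--     params
--     + U_k : int
--     + V_k : int
--     + Q_k : int
--     + modulus : int
--         modulus is from Lucas sequence params
--
--     return
--     (U_2k, V_2k, Q_2k) : tuple
--     """
--     U = (U_k * V_k) % modulus
--     V = (V_k * V_k - 2 * Q_k) % modulus
--
--     return U, V, pow(Q_k, 2, modulus)
--
-- def index_plus_one(U_k, V_k, Q_k, P, Q, modulus):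
--     """
--     Given kth elements of Lucas sequence triple, produces next elements.
--
--     params
--     + U_k : int
--     + V_k : int
--     + Q_k : int
--     + P : int
--     + Q : int
--     + modulus : int
--         P, Q, modulus are Lucas sequence params
--
--     return
--     (U_k1, V_k1, Q_k1) : tuple
--     """
--     U = ((P*U_k + V_k) * (modulus + 1) // 2) % modulus
--     V = (((P**2 - 4*Q) * U_k + P*V_k) * (modulus + 1) // 2) % modulus
--
--     return U, V, (Q_k * Q) % modulus
--
-- def _term_zero(P, Q, modulus):
--     return (0, 2, 1)
--
-- def _term_one(P, Q, modulus):
--     return (1, P % modulus, Q % modulus)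
-- ===== SOURCE B (Python) =====
-- def by_index(k, P, Q, modulus):
--     """Left-to-right binary method: walk the bits of k below the leading bit,
--     doubling the index each step and adding one on set bits."""
--     if k == 0:
--         return _term_zero(P, Q, modulus)
--     triple = _term_one(P, Q, modulus)
--     for bit in bin(k)[3:]:
--         triple = double_index(*triple, modulus)
--         if bit == '1':
--             triple = index_plus_one(*triple, P, Q, modulus)
--     return triple
--
-- def double_index(U_k, V_k, Q_k, modulus):
--     U = (U_k * V_k) % modulus
--     V = (V_k * V_k - 2 * Q_k) % modulus
--     return U, V, pow(Q_k, 2, modulus)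
--
-- def index_plus_one(U_k, V_k, Q_k, P, Q, modulus):
--     U = ((P*U_k + V_k) * (modulus + 1) // 2) % modulus
--     V = (((P**2 - 4*Q) * U_k + P*V_k) * (modulus + 1) // 2) % modulus
--     return U, V, (Q_k * Q) % modulus
--
-- def _term_zero(P, Q, modulus):
--     return (0, 2, 1)
--
-- def _term_one(P, Q, modulus):
--     return (1, P % modulus, Q % modulus)
-- ===== Notes on version B (the rewrite author's own statement) =====
-- stated objective: alternative
-- what changed: Replaces A's top-down recursion on k//2 (even) / k-1 (odd) by an iterative left-to-right binary method: seed the triple with the index-1 terms and fold the doubling/plus-one helpers over the bits of k below the leading bit.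
-- outside the precondition, e.g. on by_index(-1, 1, 1, 5): A raises RecursionError, B returns (0, 3, 1); on by_index(2, 1, 1, 0): A raises ZeroDivisionError, B raises ZeroDivisionError
import Mathlib
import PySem

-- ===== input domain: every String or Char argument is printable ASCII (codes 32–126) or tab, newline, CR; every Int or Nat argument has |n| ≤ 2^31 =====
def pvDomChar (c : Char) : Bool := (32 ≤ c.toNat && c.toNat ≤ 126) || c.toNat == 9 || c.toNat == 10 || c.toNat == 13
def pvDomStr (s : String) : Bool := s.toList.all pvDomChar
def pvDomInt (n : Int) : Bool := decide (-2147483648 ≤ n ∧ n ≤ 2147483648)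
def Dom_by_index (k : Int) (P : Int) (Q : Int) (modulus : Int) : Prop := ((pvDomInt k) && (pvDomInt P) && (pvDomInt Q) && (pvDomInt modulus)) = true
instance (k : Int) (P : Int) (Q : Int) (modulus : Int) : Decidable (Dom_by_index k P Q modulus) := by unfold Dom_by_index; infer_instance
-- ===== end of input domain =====

-- B replaces A's top-down recursion on k//2 / k-1 by the left-to-right binary method over k's bits (same modular helpers, iterative decomposition).

-- ===== PORT A =====
-- shared module helpers (used verbatim by both Pythons)
def lucasTermZero (P Q modulus : Int) : Int × Int × Int := (0, 2, 1)

def lucasTermOne (P Q modulus : Int) : Int × Int × Int :=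
  (1, PySem.Int.mod P modulus, PySem.Int.mod Q modulus)

-- pow(Q_k, 2, modulus) is exactly (Q_k*Q_k) % modulus for modulus ≠ 0
def lucasDoubleIndex (U_k V_k Q_k modulus : Int) : Int × Int × Int :=
  (PySem.Int.mod (U_k * V_k) modulus,
   PySem.Int.mod (V_k * V_k - 2 * Q_k) modulus,
   PySem.Int.mod (Q_k * Q_k) modulus)

def lucasIndexPlusOne (U_k V_k Q_k P Q modulus : Int) : Int × Int × Int :=
  (PySem.Int.mod (PySem.Int.floordiv ((P * U_k + V_k) * (modulus + 1)) 2) modulus,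
   PySem.Int.mod (PySem.Int.floordiv (((P ^ 2 - 4 * Q) * U_k + P * V_k) * (modulus + 1)) 2) modulus,
   PySem.Int.mod (Q_k * Q) modulus)

-- A's recursion, made total with fuel (A does not terminate for k < 0; Pre_ excludes that)
def by_index_go (fuel : Nat) (k P Q modulus : Int) : Int × Int × Int :=
  match fuel with
  | 0 => (0, 0, 0)
  | fuel + 1 =>
    if k = 0 then lucasTermZero P Q modulus
    else if k = 1 then lucasTermOne P Q modulus
    else if PySem.Int.mod k 2 = 0 then
      let t := by_index_go fuel (PySem.Int.floordiv k 2) P Q modulus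
      lucasDoubleIndex t.1 t.2.1 t.2.2 modulus
    else
      let t := by_index_go fuel (k - 1) P Q modulus
      lucasIndexPlusOne t.1 t.2.1 t.2.2 P Q modulus

def by_index (k : Int) (P : Int) (Q : Int) (modulus : Int) : Int × Int × Int :=
  by_index_go (k.toNat + 1) k P Q modulus

-- ===== PORT B =====
-- bin(n) digits, most significant first (n ≥ 1 has a leading true)
def lucasBits (n : Nat) : List Bool :=
  if h : n = 0 then [] else lucasBits (n / 2) ++ [n % 2 == 1]
decreasing_by exact Nat.div_lt_self (Nat.pos_of_ne_zero h) (by norm_num)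

-- one loop iteration of Source B: double the index, plus one on a set bit
def lucasStep (P Q modulus : Int) (t : Int × Int × Int) (bit : Bool) : Int × Int × Int :=
  let t' := lucasDoubleIndex t.1 t.2.1 t.2.2 modulus
  if bit then lucasIndexPlusOne t'.1 t'.2.1 t'.2.2 P Q modulus else t'

-- bin(k)[3:]: bin(k) is '-0b'+digits(|k|) for k < 0 and '0b'+digits(k) otherwise, so
-- [3:] keeps every digit of |k| when k < 0 and drops the leading digit when k > 0
def lucasBinDrop3 (k : Int) : List Bool :=
  if k < 0 then lucasBits (-k).toNat else (lucasBits k.toNat).tail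

def by_index_alt (k : Int) (P : Int) (Q : Int) (modulus : Int) : Int × Int × Int :=
  if k = 0 then lucasTermZero P Q modulus
  else (lucasBinDrop3 k).foldl (lucasStep P Q modulus) (lucasTermOne P Q modulus)

-- ===== PRECONDITION & SPEC =====
-- Pre_ excludes k < 0 (A recurses forever: RecursionError) and modulus = 0 with k ≠ 0 (A raises ZeroDivisionError).
def Pre_by_index (k : Int) (P : Int) (Q : Int) (modulus : Int) : Prop :=
  0 ≤ k ∧ (k = 0 ∨ modulus ≠ 0)
instance (k : Int) (P : Int) (Q : Int) (modulus : Int) : Decidable (Pre_by_index k P Q modulus) := by unfold Pre_by_index; infer_instance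

def pvWitness_by_index : Int × Int × Int × Int := (11, 3, -1, 7)

def Spec_by_index (k : Int) (P : Int) (Q : Int) (modulus : Int) (out : Int × Int × Int) : Prop := out = by_index_alt k P Q modulus
instance (k : Int) (P : Int) (Q : Int) (modulus : Int) (out : Int × Int × Int) : Decidable (Spec_by_index k P Q modulus out) := by unfold Spec_by_index; infer_instance

-- ===== CLAIM (what is proved, stated in full; the proofs are below) =====
def Claim_equal_by_index : Prop := ∀ (k : Int) (P : Int) (Q : Int) (modulus : Int), Dom_by_index k P Q modulus → Pre_by_index k P Q modulus → Spec_by_index k P Q modulus (by_index k P Q modulus)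

-- ===== LEMMAS AND PROOFS =====

theorem lucasBits_ne_nil {n : Nat} (h : n ≠ 0) : lucasBits n ≠ [] := by
  rw [lucasBits]; simp [h]

theorem lucasBits_even {n : Nat} (h : n ≠ 0) :
    lucasBits (2 * n) = lucasBits n ++ [false] := by
  rw [lucasBits]
  have h2 : 2 * n ≠ 0 := by omega
  simp [h2, Nat.mul_div_cancel_left n (by norm_num : 0 < 2), Nat.mul_mod_right]

theorem lucasBits_odd (n : Nat) :
    lucasBits (2 * n + 1) = lucasBits n ++ [true] := by
  rw [lucasBits]
  have h2 : 2 * n + 1 ≠ 0 := by omega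
  have hd : (2 * n + 1) / 2 = n := by omega
  have hm : (2 * n + 1) % 2 = 1 := by omega
  simp [h2, hd, hm]

theorem tail_append_singleton {α : Type} {l : List α} (h : l ≠ []) (x : α) :
    (l ++ [x]).tail = l.tail ++ [x] := by
  cases l with
  | nil => exact absurd rfl h
  | cons a t => simp

-- the value Source B's loop computes for n ≥ 1
def lucasAlt (n : Nat) (P Q modulus : Int) : Int × Int × Int :=
  (lucasBits n).tail.foldl (lucasStep P Q modulus) (lucasTermOne P Q modulus)

theorem lucasAlt_even {n : Nat} (h : n ≠ 0) (P Q modulus : Int) :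
    lucasAlt (2 * n) P Q modulus =
      (let t := lucasAlt n P Q modulus
       lucasDoubleIndex t.1 t.2.1 t.2.2 modulus) := by
  unfold lucasAlt
  rw [lucasBits_even h, tail_append_singleton (lucasBits_ne_nil h)]
  rw [List.foldl_append]
  simp [lucasStep]

theorem lucasAlt_odd {n : Nat} (h : n ≠ 0) (P Q modulus : Int) :
    lucasAlt (2 * n + 1) P Q modulus =
      (let t := lucasAlt (2 * n) P Q modulus
       lucasIndexPlusOne t.1 t.2.1 t.2.2 P Q modulus) := by
  unfold lucasAlt
  rw [lucasBits_odd n, lucasBits_even h,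
      tail_append_singleton (lucasBits_ne_nil h),
      tail_append_singleton (lucasBits_ne_nil h)]
  rw [List.foldl_append, List.foldl_append]
  simp [lucasStep]

theorem by_index_go_eq (P Q modulus : Int) :
    ∀ n fuel : Nat, n < fuel →
      by_index_go fuel (n : Int) P Q modulus =
        (if n = 0 then lucasTermZero P Q modulus else lucasAlt n P Q modulus) := by
  intro n
  induction n using Nat.strong_induction_on with
  | _ n ih =>
    intro fuel hf
    match fuel with
    | 0 => omega
    | fuel + 1 =>
      rw [by_index_go]
      by_cases h0 : n = 0
      · simp [h0]
      · by_cases h1 : n = 1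
        · subst h1
          simp [lucasAlt, lucasBits]
        · simp only [h0, h1]
          have hn0 : (n : Int) ≠ 0 := by exact_mod_cast h0
          have hn1 : (n : Int) ≠ 1 := by exact_mod_cast h1
          simp only [hn0, hn1, if_false]
          rcases Nat.even_or_odd n with ⟨m, hm⟩ | ⟨m, hm⟩
          · -- even case: n = 2m, m ≥ 1
            have hm' : n = 2 * m := by omega
            have hmne : m ≠ 0 := by omega
            have hmod : PySem.Int.mod (n : Int) 2 = 0 := by
              rw [PySem.Int.mod_eq_emod_of_pos (by norm_num : (0:Int) < 2)]; omega
            have hdiv : PySem.Int.floordiv (n : Int) 2 = (m : Int) := by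
              rw [PySem.Int.floordiv_eq_ediv_of_pos (by norm_num : (0:Int) < 2)]; omega
            simp only [hmod, if_true, hdiv]
            rw [ih m (by omega) fuel (by omega)]
            simp only [hmne, if_false]
            rw [hm', lucasAlt_even hmne]
          · -- odd case: n = 2m+1, m ≥ 1
            have hm' : n = 2 * m + 1 := by omega
            have hmne : m ≠ 0 := by omega
            have hmod : PySem.Int.mod (n : Int) 2 ≠ 0 := by
              rw [PySem.Int.mod_eq_emod_of_pos (by norm_num : (0:Int) < 2)]; omega
            simp only [hmod, if_false]
            have hsub : (n : Int) - 1 = ((2 * m : Nat) : Int) := by push_cast; omega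
            rw [hsub, ih (2 * m) (by omega) fuel (by omega)]
            have h2m : 2 * m ≠ 0 := by omega
            simp only [h2m, if_false]
            rw [hm', lucasAlt_odd hmne]

-- ===== VERDICT (by name: the statement is the Claim_ definition above) =====
theorem by_index_spec : Claim_equal_by_index := by
  intro k P Q modulus _ hpre
  obtain ⟨hk, _⟩ := hpre
  unfold Spec_by_index by_index by_index_alt
  obtain ⟨n, rfl⟩ : ∃ n : Nat, k = (n : Int) := ⟨k.toNat, (Int.toNat_of_nonneg hk).symm⟩
  rw [Int.toNat_natCast, by_index_go_eq P Q modulus n (n + 1) (by omega)]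
  by_cases h0 : n = 0
  · simp [h0]
  · have hne : (n : Int) ≠ 0 := by exact_mod_cast h0
    have hnneg : ¬ ((n : Int) < 0) := by omega
    simp [h0, hne, lucasAlt, lucasBinDrop3, hnneg]
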